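-- pv_equiv track=rewrite | github.com/barbarianJ/QA | NLPwebsite/sentence/NLP/nmt_helpers.py | nmt_get_string_by_index
-- ===== SOURCE A (Python) =====
-- def nmt_get_string_by_index(rnn_output, tgt_datas_rev_vocab):
--     if (tgt_datas_rev_vocab == None):
--         return ''
--
--     output_len = len(rnn_output)
--     res_str = ''
--     for i in range(output_len):
--         out = rnn_output[i]
--         for j in range(len(out)):
--             t = tgt_datas_rev_vocab[out[j]]
--             if (t != u'</s>'):
--                 res_str += t
--                 res_str += u' '
--         if (res_str.endswith(u' ')):
--             res_str = res_str[:-1]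
--         res_str += u'\n'
--     if (res_str.endswith(u'\n')):
--         res_str = res_str[:-1]
--     return res_str
-- ===== SOURCE B (Python) =====
-- def nmt_get_string_by_index(rnn_output, tgt_datas_rev_vocab):
--     if tgt_datas_rev_vocab == None:
--         return ''
--
--     def emit_tokens(out, first):
--         # recursive, separator-BEFORE each kept token (except the first of the line)
--         if not out:
--             return u''
--         t = tgt_datas_rev_vocab[out[0]]
--         if t == u'</s>':
--             return emit_tokens(out[1:], first)
--         return (u'' if first else u' ') + t + emit_tokens(out[1:], False)
--
--     def emit_rows(rows, first):
--         if not rows: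
--             return u''
--         return (u'' if first else u'\n') + emit_tokens(rows[0], True) + emit_rows(rows[1:], False)
--
--     return emit_rows(rnn_output, True)
-- ===== Notes on version B (the rewrite author's own statement) =====
-- stated objective: alternative
-- what changed: B is recursive and emits each separator BEFORE the next token/row (guarded by a first-element flag), instead of A's iterative append-separator-after-everything followed by endswith-checks and slice-stripping of trailing separators.
import Mathlib
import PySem

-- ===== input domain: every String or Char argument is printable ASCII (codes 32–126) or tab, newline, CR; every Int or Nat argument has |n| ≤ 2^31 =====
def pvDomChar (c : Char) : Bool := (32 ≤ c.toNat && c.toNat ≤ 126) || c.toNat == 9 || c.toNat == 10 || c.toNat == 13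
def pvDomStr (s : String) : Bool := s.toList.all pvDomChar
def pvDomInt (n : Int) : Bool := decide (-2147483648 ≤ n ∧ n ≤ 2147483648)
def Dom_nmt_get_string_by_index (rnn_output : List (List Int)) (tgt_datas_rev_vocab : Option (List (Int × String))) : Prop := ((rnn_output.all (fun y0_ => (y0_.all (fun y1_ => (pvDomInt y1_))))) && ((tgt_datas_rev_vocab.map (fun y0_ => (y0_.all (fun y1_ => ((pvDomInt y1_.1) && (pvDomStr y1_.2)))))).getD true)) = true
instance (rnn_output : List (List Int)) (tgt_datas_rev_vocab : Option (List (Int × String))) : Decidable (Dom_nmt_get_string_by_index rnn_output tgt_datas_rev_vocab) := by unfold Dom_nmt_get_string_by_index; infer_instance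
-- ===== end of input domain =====

-- B is a recursive formulation that emits each separator BEFORE the next token/row
-- (guarded by a first-element flag), instead of A's iterative append-then-strip-trailing-separator.

-- ===== PORT A =====
-- dict lookup tgt_datas_rev_vocab[j]; a missing key (KeyError) is excluded by Pre_, so the getD default is never taken inside Pre_
def pvTok (d : PySem.Dict Int String) (j : Int) : String := (PySem.Dict.get? d j).getD ""

def nmt_get_string_by_index (rnn_output : List (List Int)) (tgt_datas_rev_vocab : Option (List (Int × String))) : String :=
  match tgt_datas_rev_vocab with
  | none => ""
  | some dl =>
    let d := PySem.Dict.mk dl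
    let res : List Char := rnn_output.foldl (fun res out =>
      let res := out.foldl (fun res j =>
        let t := pvTok d j
        if t ≠ "</s>" then res ++ t.toList ++ [' '] else res) res
      let res := if PySem.Chars.endswith res [' '] then PySem.List.slice res none (some (-1)) else res
      res ++ ['\n']) []
    let res := if PySem.Chars.endswith res ['\n'] then PySem.List.slice res none (some (-1)) else res
    String.ofList res

-- ===== PORT B =====
-- emit_tokens(out, first): separator ' ' before each kept token except the first of the line
def pvEmitToks (d : PySem.Dict Int String) (out : List Int) (first : Bool) : List Char :=
  match out with
  | [] => []
  | j :: rest =>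
    let t := pvTok d j
    if t = "</s>" then pvEmitToks d rest first
    else (if first then [] else [' ']) ++ t.toList ++ pvEmitToks d rest false

-- emit_rows(rows, first): separator '\n' before each row except the first
def pvEmitRows (d : PySem.Dict Int String) (rows : List (List Int)) (first : Bool) : List Char :=
  match rows with
  | [] => []
  | r :: rest => (if first then [] else ['\n']) ++ pvEmitToks d r true ++ pvEmitRows d rest false

def nmt_get_string_by_index_alt (rnn_output : List (List Int)) (tgt_datas_rev_vocab : Option (List (Int × String))) : String :=
  match tgt_datas_rev_vocab with
  | none => ""
  | some dl => String.ofList (pvEmitRows (PySem.Dict.mk dl) rnn_output true)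

-- ===== PRECONDITION & SPEC =====
-- Pre_ excludes exactly the inputs where the Python raises KeyError: a vocabulary dict missing some index of rnn_output.
def Pre_nmt_get_string_by_index (rnn_output : List (List Int)) (tgt_datas_rev_vocab : Option (List (Int × String))) : Prop :=
  (tgt_datas_rev_vocab.map (fun dl => rnn_output.all (fun out => out.all (fun j => (PySem.Dict.mk dl).contains j)))).getD true = true
instance (rnn_output : List (List Int)) (tgt_datas_rev_vocab : Option (List (Int × String))) : Decidable (Pre_nmt_get_string_by_index rnn_output tgt_datas_rev_vocab) := by unfold Pre_nmt_get_string_by_index; infer_instance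
def pvWitness_nmt_get_string_by_index : List (List Int) × (Option (List (Int × String))) := ([[0, 1], [2]], some [(0, "a"), (1, "</s>"), (2, "b c")])

def Spec_nmt_get_string_by_index (rnn_output : List (List Int)) (tgt_datas_rev_vocab : Option (List (Int × String))) (out : String) : Prop := out = nmt_get_string_by_index_alt rnn_output tgt_datas_rev_vocab
instance (rnn_output : List (List Int)) (tgt_datas_rev_vocab : Option (List (Int × String))) (out : String) : Decidable (Spec_nmt_get_string_by_index rnn_output tgt_datas_rev_vocab out) := by unfold Spec_nmt_get_string_by_index; infer_instance

-- ===== CLAIM (what is proved, stated in full; the proofs are below) =====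
def Claim_equal_nmt_get_string_by_index : Prop := ∀ (rnn_output : List (List Int)) (tgt_datas_rev_vocab : Option (List (Int × String))), Dom_nmt_get_string_by_index rnn_output tgt_datas_rev_vocab → Pre_nmt_get_string_by_index rnn_output tgt_datas_rev_vocab → Spec_nmt_get_string_by_index rnn_output tgt_datas_rev_vocab (nmt_get_string_by_index rnn_output tgt_datas_rev_vocab)

-- ===== LEMMAS AND PROOFS =====

-- s.endswith(c) for a one-character suffix is a fact about the last character
theorem pv_endswith_singleton (s : List Char) (c : Char) :
    PySem.Chars.endswith s [c] = true ↔ s.getLast? = some c := by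
  rcases List.eq_nil_or_concat s with rfl | ⟨t, a, rfl⟩
  · simp [PySem.Chars.endswith, List.isSuffixOf]
  · simp [PySem.Chars.endswith, List.isSuffixOf]
    exact eq_comm

-- join with a one-char separator = head ++ (separator-prefixed tail chunks)
theorem pv_join_cons (c : Char) (p : List Char) (parts : List (List Char)) :
    PySem.Chars.join [c] (p :: parts) = p ++ (parts.map (fun t => c :: t)).flatten := by
  induction parts generalizing p with
  | nil => simp [PySem.Chars.join_singleton]
  | cons q rest ih => rw [PySem.Chars.join_cons_cons, ih q]; simp

-- flattening chunks 'token ++ separator' is join-with-separator plus one trailing separator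
theorem pv_flatten_concat_sep (p : List Char) (parts : List (List Char)) (c : Char) :
    ((p :: parts).map (fun t => t ++ [c])).flatten = PySem.Chars.join [c] (p :: parts) ++ [c] := by
  induction parts generalizing p with
  | nil => simp [PySem.Chars.join_singleton]
  | cons q rest ih =>
    rw [List.map_cons, List.flatten_cons, ih, PySem.Chars.join_cons_cons]
    simp

-- the inner loop over one row appends each kept token followed by a space
theorem pv_inner (d : PySem.Dict Int String) (out : List Int) (res : List Char) :
    out.foldl (fun res j =>
        let t := pvTok d j
        if t ≠ "</s>" then res ++ t.toList ++ [' '] else res) res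
      = res ++ ((((out.map (pvTok d)).filter (fun t => t ≠ "</s>")).map String.toList).map (fun t => t ++ [' '])).flatten := by
  induction out generalizing res with
  | nil => simp
  | cons j rest ih =>
    simp only [List.foldl_cons, List.map_cons, List.filter_cons]
    by_cases h : pvTok d j = "</s>"
    · rw [show (let t := pvTok d j; if t ≠ "</s>" then res ++ t.toList ++ [' '] else res) = res from by simp [h], ih]
      simp [h]
    · rw [show (let t := pvTok d j; if t ≠ "</s>" then res ++ t.toList ++ [' '] else res) = res ++ (pvTok d j).toList ++ [' '] from by simp [h], ih]
      simp [h]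

-- one iteration of the outer loop (as it appears after beta/zeta reduction), on an
-- accumulator that is empty or ends with a newline, appends 'joined line ++ newline'
theorem pv_rowstep (d : PySem.Dict Int String) (out : List Int) (res : List Char)
    (hres : res = [] ∨ res.getLast? = some '\n') :
    ((if PySem.Chars.endswith (out.foldl (fun res j =>
          let t := pvTok d j
          if t ≠ "</s>" then res ++ t.toList ++ [' '] else res) res) [' '] = true
      then PySem.List.slice (out.foldl (fun res j =>
          let t := pvTok d j
          if t ≠ "</s>" then res ++ t.toList ++ [' '] else res) res) none (some (-1))
      else out.foldl (fun res j =>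
          let t := pvTok d j
          if t ≠ "</s>" then res ++ t.toList ++ [' '] else res) res) ++ ['\n'])
    = res ++ (PySem.Chars.join [' '] (((out.map (pvTok d)).filter (fun t => t ≠ "</s>")).map String.toList) ++ ['\n']) := by
  have hns : PySem.Chars.endswith res [' '] = false := by
    rcases hres with rfl | h
    · simp [PySem.Chars.endswith]
    · rw [Bool.eq_false_iff]
      intro hc
      rw [pv_endswith_singleton, h] at hc
      simp at hc
  rw [pv_inner]
  rcases htoks : ((out.map (pvTok d)).filter (fun t => t ≠ "</s>")).map String.toList with _ | ⟨p, parts⟩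
  · simp [hns, PySem.Chars.join_nil]
  · rw [pv_flatten_concat_sep, ← List.append_assoc, ← List.append_assoc]
    have hend : PySem.Chars.endswith (res ++ PySem.Chars.join [' '] (p :: parts) ++ [' ']) [' '] = true := by
      rw [pv_endswith_singleton]; simp
    rw [hend, if_pos rfl, PySem.List.slice_to_neg_one, List.dropLast_concat]

-- the outer loop accumulates 'line ++ newline' for every row
theorem pv_outer (d : PySem.Dict Int String) (rows : List (List Int)) (res : List Char)
    (hres : res = [] ∨ res.getLast? = some '\n') :
    rows.foldl (fun res out =>
      let res := out.foldl (fun res j =>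
        let t := pvTok d j
        if t ≠ "</s>" then res ++ t.toList ++ [' '] else res) res
      let res := if PySem.Chars.endswith res [' '] then PySem.List.slice res none (some (-1)) else res
      res ++ ['\n']) res
    = res ++ (rows.map (fun out =>
        PySem.Chars.join [' '] (((out.map (pvTok d)).filter (fun t => t ≠ "</s>")).map String.toList) ++ ['\n'])).flatten := by
  induction rows generalizing res with
  | nil => simp
  | cons out rest ih =>
    simp only [List.foldl_cons]
    rw [pv_rowstep d out res hres, ih (res ++ (PySem.Chars.join [' ']
        (((out.map (pvTok d)).filter (fun t => t ≠ "</s>")).map String.toList) ++ ['\n'])) (Or.inr (by simp))]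
    simp

-- stripping the final newline from 'lines joined each with a trailing newline' is '\n'.join(lines)
theorem pv_final_strip (lines : List (List Char)) :
    (if PySem.Chars.endswith ((lines.map (fun l => l ++ ['\n'])).flatten) ['\n'] = true
     then PySem.List.slice ((lines.map (fun l => l ++ ['\n'])).flatten) none (some (-1))
     else (lines.map (fun l => l ++ ['\n'])).flatten)
    = PySem.Chars.join ['\n'] lines := by
  cases lines with
  | nil => simp [PySem.Chars.join_nil, PySem.Chars.endswith]
  | cons p rest =>
    rw [pv_flatten_concat_sep]
    have hend : PySem.Chars.endswith (PySem.Chars.join ['\n'] (p :: rest) ++ ['\n']) ['\n'] = true := by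
      rw [pv_endswith_singleton]; simp
    rw [hend, if_pos rfl, PySem.List.slice_to_neg_one, List.dropLast_concat]

-- B's token recursion computes the join (first = true) / the separator-prefixed chunks (first = false)
theorem pv_emitToks_join (d : PySem.Dict Int String) (out : List Int) :
    ∀ first : Bool, pvEmitToks d out first =
      (if first then PySem.Chars.join [' '] (((out.map (pvTok d)).filter (fun t => t ≠ "</s>")).map String.toList)
       else ((((out.map (pvTok d)).filter (fun t => t ≠ "</s>")).map String.toList).map (fun t => ' ' :: t)).flatten) := by
  induction out with
  | nil => intro first; cases first <;> simp [pvEmitToks, PySem.Chars.join_nil]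
  | cons j rest ih =>
    intro first
    simp only [pvEmitToks, List.map_cons, List.filter_cons]
    by_cases h : pvTok d j = "</s>"
    · simp [h, ih first]
    · simp only [h, ih false]
      cases first with
      | false => simp [h]
      | true => simp [h, pv_join_cons]

-- B's row recursion (first = true) computes '\n'.join of the per-row joins
theorem pv_emitRows_join (d : PySem.Dict Int String) (rows : List (List Int)) :
    ∀ first : Bool, pvEmitRows d rows first =
      (if first then PySem.Chars.join ['\n'] (rows.map (fun out =>
          PySem.Chars.join [' '] (((out.map (pvTok d)).filter (fun t => t ≠ "</s>")).map String.toList)))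
       else ((rows.map (fun out =>
          PySem.Chars.join [' '] (((out.map (pvTok d)).filter (fun t => t ≠ "</s>")).map String.toList))).map (fun t => '\n' :: t)).flatten) := by
  induction rows with
  | nil => intro first; cases first <;> simp [pvEmitRows, PySem.Chars.join_nil]
  | cons r rest ih =>
    intro first
    simp only [pvEmitRows, List.map_cons, ih false, pv_emitToks_join d r true, if_pos]
    cases first with
    | false => simp
    | true => simp [pv_join_cons]

-- ===== VERDICT (by name: the statement is the Claim_ definition above) =====
theorem nmt_get_string_by_index_spec : Claim_equal_nmt_get_string_by_index := by
  unfold Claim_equal_nmt_get_string_by_index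
  intro rnn_output voc _ _
  unfold Spec_nmt_get_string_by_index nmt_get_string_by_index nmt_get_string_by_index_alt
  cases voc with
  | none => rfl
  | some dl =>
    simp only
    rw [pv_outer (PySem.Dict.mk dl) rnn_output [] (Or.inl rfl), List.nil_append]
    rw [show rnn_output.map (fun out =>
          PySem.Chars.join [' '] (((out.map (pvTok (PySem.Dict.mk dl))).filter (fun t => t ≠ "</s>")).map String.toList) ++ ['\n'])
        = (rnn_output.map (fun out =>
          PySem.Chars.join [' '] (((out.map (pvTok (PySem.Dict.mk dl))).filter (fun t => t ≠ "</s>")).map String.toList))).map (fun l => l ++ ['\n'])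
      from by rw [List.map_map]; rfl]
    rw [pv_final_strip, pv_emitRows_join (PySem.Dict.mk dl) rnn_output true, if_pos rfl]
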